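-- pv_equiv track=rewrite | github.com/wangcongai/leetcode | 最长连续假期时间/longest_holidays.py | max_vacation
-- ===== SOURCE A (Python) =====
-- def max_vacation(holidays, m):
--     max_len = 0  # 最长假期长度
--     temp_len = 0  # 当前假期长度
--     j = 0  # 滑动窗口的开始位置
--     for i in range(len(holidays)):
--         # 如果当前是工作日，则消耗一天年假
--         if holidays[i] == 1:
--             if m > 0:
--                 m -= 1
--                 temp_len += 1
--             # 如果当前是工作日，但是已经没有假期时间可以扣除
--             else:
--                 # 移动窗口的开始位置，直到补回一天年假
--                 while holidays[j] == 0: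
--                     j += 1
--                     temp_len -= 1
--                 j += 1
--         else:
--             temp_len += 1
--         # 更新最长假期长度
--         max_len = max(max_len, temp_len)
--     return max_len
-- ===== SOURCE B (Python) =====
-- def max_vacation(holidays, m):
--     # Table-driven re-implementation: precompute the positions of nonzero days
--     # and the running count of workdays; the window's left edge is then read
--     # off directly instead of maintained by a sliding pointer.
--     budget = m if m > 0 else 0
--     nz = [p for p, v in enumerate(holidays) if v != 0]
--     best = 0
--     ones = 0
--     for i, v in enumerate(holidays):
--         if v == 1:
--             ones += 1
--         left = 0 if ones <= budget else nz[ones - budget - 1] + 1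
--         if i + 1 - left > best:
--             best = i + 1 - left
--     return best
-- ===== Notes on version B (the rewrite author's own statement) =====
-- stated objective: alternative
-- what changed: Replaces A's incremental two-pointer window bookkeeping (with an inner while-loop that slides the left edge) by precomputing the list of nonzero positions and a running workday count, reading the window's left edge off the table directly each step.
import Mathlib
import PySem

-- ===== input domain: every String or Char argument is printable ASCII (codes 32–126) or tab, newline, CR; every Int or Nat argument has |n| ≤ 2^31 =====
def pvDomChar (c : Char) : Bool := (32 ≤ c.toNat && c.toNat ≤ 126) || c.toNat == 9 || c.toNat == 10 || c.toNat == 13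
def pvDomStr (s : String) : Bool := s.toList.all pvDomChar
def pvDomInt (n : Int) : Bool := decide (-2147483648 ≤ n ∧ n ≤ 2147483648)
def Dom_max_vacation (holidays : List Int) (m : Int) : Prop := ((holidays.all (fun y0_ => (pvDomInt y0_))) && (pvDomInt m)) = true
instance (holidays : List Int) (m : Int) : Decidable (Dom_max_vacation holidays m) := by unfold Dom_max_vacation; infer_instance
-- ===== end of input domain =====

-- B replaces A's incremental two-pointer bookkeeping by a precomputed table of nonzero
-- positions from which the window's left edge is read off directly (objective: alternative).

-- ===== PORT A =====
-- 'while holidays[j] == 0: j += 1; temp_len -= 1', ported with fuel = holidays.length: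
-- the loop is entered only when holidays[i] == 1 for some i ≥ j, so it always stops at an
-- in-range nonzero position and the fuel bound is never reached (pyGetD is exact in range).
def mvSkip (h : List Int) : Nat → Int → Int → Int × Int
  | 0, j, t => (j, t)
  | fuel+1, j, t =>
      if PySem.List.pyGetD h j 0 == 0 then mvSkip h fuel (j + 1) (t - 1) else (j, t)

def max_vacation (holidays : List Int) (m : Int) : Int :=
  ((PySem.List.pyRange 0 (PySem.List.len holidays) 1).foldl
    (fun (st : Int × Int × Int × Int) (i : Int) =>
      let maxl := st.1
      let temp := st.2.1
      let j := st.2.2.1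
      let mm := st.2.2.2
      let s2 : Int × Int × Int :=
        if PySem.List.pyGetD holidays i 0 == 1 then
          if mm > 0 then (temp + 1, j, mm - 1)
          else
            let p := mvSkip holidays holidays.length j temp
            (p.2, p.1 + 1, mm)
        else (temp + 1, j, mm)
      (max maxl s2.1, s2))
    (0, 0, 0, m)).1

-- ===== PORT B =====
-- nz[ones - budget - 1] is always an in-range, non-negative index (ones > budget ≥ 0 and the
-- first `ones` nonzero positions exist), so pyGetD is exact for Python's nz[...] here.
def max_vacation_alt (holidays : List Int) (m : Int) : Int :=
  let budget : Int := if m > 0 then m else 0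
  let nz : List Int :=
    ((PySem.List.enumerate holidays 0).filter (fun pv => pv.2 != 0)).map (fun pv => pv.1)
  ((PySem.List.enumerate holidays 0).foldl
    (fun (st : Int × Int) (iv : Int × Int) =>
      let ones : Int := if iv.2 == 1 then st.2 + 1 else st.2
      let left : Int :=
        if ones ≤ budget then 0 else PySem.List.pyGetD nz (ones - budget - 1) 0 + 1
      (if iv.1 + 1 - left > st.1 then iv.1 + 1 - left else st.1, ones))
    (0, 0)).1

-- ===== PRECONDITION & SPEC =====
def Spec_max_vacation (holidays : List Int) (m : Int) (out : Int) : Prop := out = max_vacation_alt holidays m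
instance (holidays : List Int) (m : Int) (out : Int) : Decidable (Spec_max_vacation holidays m out) := by unfold Spec_max_vacation; infer_instance

-- ===== CLAIM (what is proved, stated in full; the proofs are below) =====
def Claim_equal_max_vacation : Prop := ∀ (holidays : List Int) (m : Int), Dom_max_vacation holidays m → Spec_max_vacation holidays m (max_vacation holidays m)

-- ===== LEMMAS AND PROOFS =====

-- nonzero positions of h, in increasing order
def mvNZ (h : List Int) : List Nat := (List.range h.length).filter (fun p => h.getD p 0 != 0)
-- number of workdays (value 1) among the first i days
def mvOnes (h : List Int) (i : Nat) : Nat := (List.range i).countP (fun p => h.getD p 0 == 1)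
-- number of nonzero days among the first i days
def mvNZC (h : List Int) (i : Nat) : Nat := (List.range i).countP (fun p => h.getD p 0 != 0)
def mvCast (l : List Nat) : List Int := l.map (fun p => Int.ofNat p)
-- closed form of the window's left edge after processing i days
def mvJ (h : List Int) (m : Int) (i : Nat) : Int :=
  if mvOnes h i ≤ m.toNat then 0 else ((mvNZ h).getD (mvOnes h i - m.toNat - 1) 0 : Int) + 1
-- common closed form of the running maximum
def mvBest (h : List Int) (m : Int) : Nat → Int
  | 0 => 0
  | i+1 => max (mvBest h m i) ((i : Int) + 1 - mvJ h m (i + 1))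

-- the two folds, re-expressed over List.range h.length
def mvStepA (h : List Int) (st : Int × Int × Int × Int) (k : Nat) : Int × Int × Int × Int :=
  let s2 : Int × Int × Int :=
    if h.getD k 0 == 1 then
      if st.2.2.2 > 0 then (st.2.1 + 1, st.2.2.1, st.2.2.2 - 1)
      else
        let p := mvSkip h h.length st.2.2.1 st.2.1
        (p.2, p.1 + 1, st.2.2.2)
    else (st.2.1 + 1, st.2.2.1, st.2.2.2)
  (max st.1 s2.1, s2)

def mvStepB (h : List Int) (m : Int) (st : Int × Int) (k : Nat) : Int × Int :=
  let budget : Int := if m > 0 then m else 0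
  let ones : Int := if h.getD k 0 == 1 then st.2 + 1 else st.2
  let left : Int :=
    if ones ≤ budget then 0
    else PySem.List.pyGetD (mvCast (mvNZ h)) (ones - budget - 1) 0 + 1
  (if (k : Int) + 1 - left > st.1 then (k : Int) + 1 - left else st.1, ones)

theorem foldlCongr {α β : Type} (l : List β) (i : α) (f g : α → β → α)
    (hfg : ∀ a b, f a b = g a b) : l.foldl f i = l.foldl g i := by
  have : f = g := funext fun a => funext fun b => hfg a b
  rw [this]

theorem mvA_eq (h : List Int) (m : Int) :
    max_vacation h m = ((List.range h.length).foldl (mvStepA h) (0, 0, 0, m)).1 := by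
  simp only [max_vacation]
  rw [PySem.List.len_eq, PySem.List.pyRange_one]
  simp only [List.foldl_map]
  rw [show ((h.length : Int) - 0).toNat = h.length from by omega]
  refine congrArg Prod.fst (foldlCongr _ _ _ _ ?_)
  intro st k
  simp [mvStepA]

theorem mvNZ_port_eq (h : List Int) :
    ((PySem.List.enumerate h 0).filter (fun pv => pv.2 != 0)).map (fun pv => pv.1)
      = mvCast (mvNZ h) := by
  rw [PySem.List.enumerate_eq_map_pyRange (d := 0), PySem.List.pyRange_one,
     List.map_map, List.filter_map, List.map_map]
  simp only [mvNZ, mvCast, Function.comp_def]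
  norm_num

theorem mvB_eq (h : List Int) (m : Int) :
    max_vacation_alt h m = ((List.range h.length).foldl (mvStepB h m) (0, 0)).1 := by
  simp only [max_vacation_alt]
  rw [mvNZ_port_eq, PySem.List.enumerate_eq_map_pyRange (d := 0), PySem.List.len_eq,
     PySem.List.pyRange_one]
  simp only [List.map_map, List.foldl_map]
  rw [show ((h.length : Int) - 0).toNat = h.length from by omega]
  refine congrArg Prod.fst (foldlCongr _ _ _ _ ?_)
  intro st k
  simp [mvStepB]

theorem mvOnes_succ (h : List Int) (i : Nat) :
    mvOnes h (i + 1) = mvOnes h i + (if h.getD i 0 == 1 then 1 else 0) := by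
  simp [mvOnes, List.range_succ, List.countP_append, List.countP_cons]

theorem mvOnes_le_mvNZC (h : List Int) (i : Nat) : mvOnes h i ≤ mvNZC h i := by
  refine List.countP_mono_left ?_
  intro x _ hx
  have h1 : h[x]?.getD 0 = (1 : Int) := by simpa [List.getD] using hx
  simp [h1]

theorem mvNZC_mono (h : List Int) {i j : Nat} (hij : i ≤ j) : mvNZC h i ≤ mvNZC h j :=
  (List.range_sublist.mpr hij).countP_le

theorem mvNZ_length (h : List Int) : (mvNZ h).length = mvNZC h h.length := by
  simp [mvNZ, mvNZC, List.countP_eq_length_filter]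

theorem mvNZ_mem {h : List Int} {p : Nat} :
    p ∈ mvNZ h ↔ p < h.length ∧ h.getD p 0 ≠ 0 := by
  simp [mvNZ, List.mem_filter, List.mem_range]

theorem mvNZ_sorted (h : List Int) : (mvNZ h).Pairwise (· < ·) :=
  (List.pairwise_lt_range).filter _

theorem mvNZ_strict {h : List Int} {a b : Nat} (hab : a < b) (hb : b < (mvNZ h).length) :
    (mvNZ h)[a]'(lt_trans hab hb) < (mvNZ h)[b] :=
  List.pairwise_iff_getElem.mp (mvNZ_sorted h) a b (lt_trans hab hb) hb hab

theorem mvNZ_mono {h : List Int} {a b : Nat} (hab : a ≤ b) (hb : b < (mvNZ h).length) :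
    (mvNZ h)[a]'(lt_of_le_of_lt hab hb) ≤ (mvNZ h)[b] := by
  rcases Nat.lt_or_ge a b with hlt | hge
  · exact le_of_lt (mvNZ_strict hlt hb)
  · have : a = b := le_antisymm hab hge
    subst this; exact le_rfl

-- between a lower bound below nz[k] that exceeds every earlier entry and nz[k] itself,
-- every day is 0
theorem mvNZ_gap {h : List Int} {k : Nat} (hk : k < (mvNZ h).length) {s p : Nat}
    (hs : ∀ a, (ha : a < k) → (mvNZ h)[a]'(lt_trans ha hk) < s)
    (hsp : s ≤ p) (hp : p < (mvNZ h)[k]) : h.getD p 0 = 0 := by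
  by_contra hne
  have hpn : p < h.length := lt_trans hp (mvNZ_mem.mp (List.getElem_mem hk)).1
  have hmem : p ∈ mvNZ h := mvNZ_mem.mpr ⟨hpn, hne⟩
  obtain ⟨t, ht, hpt⟩ := List.mem_iff_getElem.mp hmem
  rcases Nat.lt_or_ge t k with hlt | hge
  · have := hs t hlt; omega
  · have := mvNZ_mono hge ht; omega

theorem mvSkip_spec (h : List Int) (e : Nat) (he : h.getD e 0 ≠ 0) :
    ∀ (fuel : Nat) (j t : Int), 0 ≤ j → j ≤ (e : Int) → ((e : Int) - j).toNat ≤ fuel →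
      (∀ p : Nat, j ≤ (p : Int) → p < e → h.getD p 0 = 0) →
      mvSkip h fuel j t = ((e : Int), t - ((e : Int) - j)) := by
  intro fuel
  induction fuel with
  | zero =>
      intro j t h0 hje hfu _
      have : j = (e : Int) := by omega
      subst this
      simp [mvSkip]
  | succ n ih =>
      intro j t h0 hje hfu hzero
      rcases eq_or_lt_of_le hje with heq | hlt
      · have hpg : PySem.List.pyGetD h j 0 = h.getD e 0 := by
          rw [heq, PySem.List.pyGetD_natCast]
        simp only [mvSkip]
        rw [if_neg (by simp only [hpg, beq_iff_eq]; exact he), heq]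
        norm_num
      · have hj : h.getD j.toNat 0 = 0 := hzero j.toNat (by omega) (by omega)
        have hpg : PySem.List.pyGetD h j 0 = 0 := by
          rw [show j = ((j.toNat : Nat) : Int) by omega, PySem.List.pyGetD_natCast]
          exact hj
        rw [mvSkip, if_pos (by simp [hpg])]
        rw [ih (j + 1) (t - 1) (by omega) (by omega) (by omega)
          (fun p hp1 hp2 => hzero p (by omega) hp2)]
        ring_nf

theorem getD_map_cast (l : List Nat) (t : Nat) :
    (mvCast l).getD t 0 = ((l.getD t 0 : Nat) : Int) := by
  rcases Nat.lt_or_ge t l.length with hlt | hge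
  · rw [List.getD_eq_getElem _ _ (by simp [mvCast]; omega), List.getD_eq_getElem _ _ hlt]
    simp [mvCast]
  · rw [List.getD_eq_default _ _ (by simp [mvCast]; omega), List.getD_eq_default _ _ hge]
    norm_num

theorem mvBudget_eq (m : Int) : (if m > 0 then m else 0) = (m.toNat : Int) := by
  split <;> omega

theorem mvMaxIf (b x : Int) : (if x > b then x else b) = max b x := by
  rcases le_total x b with hle | hle
  · rw [if_neg (by omega), max_eq_left hle]
  · rcases eq_or_lt_of_le hle with heq | hlt
    · subst heq; simp
    · rw [if_pos hlt, max_eq_right hle]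

-- the main invariant: after i steps A's state is (best, i - left, left, m - used) and
-- B's state is (best, ones), with the shared closed forms above
theorem mvMain (h : List Int) (m : Int) :
    ∀ i : Nat, i ≤ h.length →
      ((List.range i).foldl (mvStepA h) (0, 0, 0, m)
          = (mvBest h m i, (i : Int) - mvJ h m i, mvJ h m i,
             m - (min (mvOnes h i) m.toNat : Nat))
        ∧ (List.range i).foldl (mvStepB h m) (0, 0) = (mvBest h m i, (mvOnes h i : Int))) := by
  intro i
  induction i with
  | zero =>
      intro _
      simp [mvBest, mvOnes, mvJ]
  | succ i ih =>
      intro hin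
      obtain ⟨ihA, ihB⟩ := ih (by omega)
      rw [List.range_succ, List.foldl_append, List.foldl_append, ihA, ihB]
      simp only [List.foldl_cons, List.foldl_nil]
      have hbud := mvBudget_eq m
      have honessucc := mvOnes_succ h i
      by_cases hone : h.getD i 0 == 1
      · have hones1 : mvOnes h (i + 1) = mvOnes h i + 1 := by
          rw [honessucc, if_pos hone]
        by_cases hlt : mvOnes h i < m.toNat
        · -- budget not yet exhausted: A takes the mm > 0 branch, the left edge stays 0
          have hmm : m - ((min (mvOnes h i) m.toNat : Nat) : Int) > 0 := by omega
          have hJi : mvJ h m i = 0 := by unfold mvJ; rw [if_pos (by omega)]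
          have hJi1 : mvJ h m (i + 1) = 0 := by unfold mvJ; rw [if_pos (by omega)]
          constructor
          · simp only [mvStepA]
            rw [if_pos hone, if_pos hmm]
            simp only [mvBest, hJi, hJi1, hones1, Prod.mk.injEq]
            refine ⟨?_, ?_, ?_, ?_⟩ <;> push_cast <;> omega
          · simp only [mvStepB]
            rw [if_pos hone, hbud, mvMaxIf, if_pos (by push_cast; omega)]
            simp only [mvBest, hJi1, hones1, Prod.mk.injEq]
            constructor <;> push_cast <;> omega
        · -- budget exhausted: A slides past the next nonzero position nz[k], k = ones - budget
          have hge : m.toNat ≤ mvOnes h i := by omega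
          have hklen : mvOnes h i - m.toNat < (mvNZ h).length := by
            have h1 : mvOnes h (i + 1) ≤ mvNZC h (i + 1) := mvOnes_le_mvNZC h (i + 1)
            have h2 : mvNZC h (i + 1) ≤ mvNZC h h.length := mvNZC_mono h (by omega)
            have h3 := mvNZ_length h
            omega
          have hnzmem := mvNZ_mem.mp (List.getElem_mem hklen)
          have hJform : mvJ h m i =
              (if mvOnes h i - m.toNat = 0 then 0
               else ((mvNZ h)[mvOnes h i - m.toNat - 1]'(by omega) : Int) + 1) := by
            unfold mvJ
            by_cases hk0 : mvOnes h i - m.toNat = 0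
            · rw [if_pos (by omega), if_pos hk0]
            · rw [if_neg (by omega), if_neg hk0,
                 List.getD_eq_getElem _ _ (by omega)]
          have hstart_nonneg : 0 ≤ mvJ h m i := by
            rw [hJform]
            split
            · omega
            · positivity
          have hstart_le : mvJ h m i ≤ ((mvNZ h)[mvOnes h i - m.toNat]'hklen : Int) := by
            rw [hJform]
            by_cases hk0 : mvOnes h i - m.toNat = 0
            · rw [if_pos hk0]; positivity
            · rw [if_neg hk0]
              have := mvNZ_strict (h := h) (a := mvOnes h i - m.toNat - 1)
                (b := mvOnes h i - m.toNat) (by omega) hklen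
              push_cast
              omega
          have hzero : ∀ p : Nat, mvJ h m i ≤ (p : Int) →
              p < (mvNZ h)[mvOnes h i - m.toNat]'hklen → h.getD p 0 = 0 := by
            intro p hp1 hp2
            refine mvNZ_gap hklen (s := (mvJ h m i).toNat) ?_ (by omega) hp2
            intro a ha
            by_cases hk0 : mvOnes h i - m.toNat = 0
            · exact absurd ha (by omega)
            · have hmono := mvNZ_mono (h := h) (a := a) (b := mvOnes h i - m.toNat - 1)
                (by omega) (by omega)
              rw [hJform, if_neg hk0]
              omega
          have hskip := mvSkip_spec h ((mvNZ h)[mvOnes h i - m.toNat]'hklen) hnzmem.2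
            h.length (mvJ h m i) ((i : Int) - mvJ h m i) hstart_nonneg hstart_le
            (by omega) hzero
          have hmmn : ¬ (m - ((min (mvOnes h i) m.toNat : Nat) : Int) > 0) := by omega
          have hJi1 : mvJ h m (i + 1) =
              ((mvNZ h)[mvOnes h i - m.toNat]'hklen : Int) + 1 := by
            unfold mvJ
            rw [hones1, if_neg (by omega),
               show mvOnes h i + 1 - m.toNat - 1 = mvOnes h i - m.toNat from by omega,
               List.getD_eq_getElem _ _ hklen]
          constructor
          · simp only [mvStepA]
            rw [if_pos hone, if_neg hmmn, hskip]
            simp only [mvBest, hJi1, hones1, Prod.mk.injEq]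
            refine ⟨?_, ?_, ?_, ?_⟩ <;> push_cast <;> omega
          · simp only [mvStepB]
            rw [if_pos hone, hbud, mvMaxIf, if_neg (by push_cast; omega),
               show ((mvOnes h i : Nat) : Int) + 1 - (m.toNat : Int) - 1
                   = ((mvOnes h i - m.toNat : Nat) : Int) from by push_cast; omega,
               PySem.List.pyGetD_natCast, getD_map_cast, List.getD_eq_getElem _ _ hklen]
            simp only [mvBest, hJi1, hones1, Prod.mk.injEq]
            constructor <;> push_cast <;> omega
      · -- a free day: only the window length grows
        have hones1 : mvOnes h (i + 1) = mvOnes h i := by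
          rw [honessucc, if_neg hone]
          omega
        have hJeq : mvJ h m (i + 1) = mvJ h m i := by unfold mvJ; rw [hones1]
        constructor
        · simp only [mvStepA]
          rw [if_neg hone]
          simp only [mvBest, hJeq, hones1, Prod.mk.injEq]
          and_intros <;> first | trivial | (push_cast; omega)
        · simp only [mvStepB]
          rw [if_neg hone, hbud, mvMaxIf]
          by_cases hcase : mvOnes h i ≤ m.toNat
          · rw [if_pos (by push_cast; omega)]
            have hJv : mvJ h m (i + 1) = 0 := by
              unfold mvJ; rw [hones1, if_pos hcase]
            simp only [mvBest, hJv, hones1]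
          · rw [if_neg (by push_cast; omega),
               show ((mvOnes h i : Nat) : Int) - (m.toNat : Int) - 1
                   = ((mvOnes h i - m.toNat - 1 : Nat) : Int) from by push_cast; omega,
               PySem.List.pyGetD_natCast, getD_map_cast]
            have hJv : mvJ h m (i + 1) =
                ((mvNZ h).getD (mvOnes h i - m.toNat - 1) 0 : Int) + 1 := by
              rw [hJeq]; unfold mvJ; rw [if_neg hcase]
            simp only [mvBest, hJv, hones1]

-- ===== VERDICT (by name: the statement is the Claim_ definition above) =====
theorem max_vacation_spec : Claim_equal_max_vacation := by
  intro h m _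
  unfold Spec_max_vacation
  rw [mvA_eq, mvB_eq, (mvMain h m h.length le_rfl).1, (mvMain h m h.length le_rfl).2]
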